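-- pv_equiv track=rewrite | github.com/MatiasCardullo/Ogame | workers/new_galaxy_worker.py | parse_mission_flags
-- ===== SOURCE A (Python) =====
-- def parse_mission_flags(available):
--     flags = {
--         1: "can_attack",
--         3: "can_transport",
--         4: "can_deploy",
--         5: "can_hold",
--         6: "can_espionage",
--         9: "can_destroy",
--     }
--
--     result = {v: 0 for v in flags.values()}
--
--     for m in available or []:
--         mt = m.get("missionType")
--         if mt in flags:
--             result[flags[mt]] = 1
--
--     return result
-- ===== SOURCE B (Python) =====
-- def parse_mission_flags(available):
--     flags = {
--         1: "can_attack",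
--         3: "can_transport",
--         4: "can_deploy",
--         5: "can_hold",
--         6: "can_espionage",
--         9: "can_destroy",
--     }
--     present = {m.get("missionType") for m in available or []}
--     return {name: int(mt in present) for mt, name in flags.items()}
-- ===== Notes on version B (the rewrite author's own statement) =====
-- stated objective: idiomatic
-- what changed: Instead of looping over the missions and writing 1 into a pre-zeroed result dict, B makes one pass collecting the set of present missionType values and then builds the result in a single comprehension over the fixed flags table, testing membership in that set.
import Mathlib
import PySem

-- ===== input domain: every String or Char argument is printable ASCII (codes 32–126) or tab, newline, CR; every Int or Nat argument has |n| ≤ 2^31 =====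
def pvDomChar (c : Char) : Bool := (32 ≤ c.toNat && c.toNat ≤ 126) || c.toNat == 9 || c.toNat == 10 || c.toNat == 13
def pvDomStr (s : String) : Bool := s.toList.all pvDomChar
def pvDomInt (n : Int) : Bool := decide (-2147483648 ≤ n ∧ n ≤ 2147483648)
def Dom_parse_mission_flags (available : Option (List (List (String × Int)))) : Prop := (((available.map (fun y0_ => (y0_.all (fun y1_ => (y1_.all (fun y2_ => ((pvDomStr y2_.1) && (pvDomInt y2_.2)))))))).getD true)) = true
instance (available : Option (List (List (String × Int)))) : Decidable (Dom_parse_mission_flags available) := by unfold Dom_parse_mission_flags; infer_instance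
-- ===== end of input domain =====

-- B replaces A's write-into-result loop by building the set of present missionType
-- values first and then mapping a membership test over the fixed flags table (idiomatic).


-- ===== PORT A =====
-- the literal `flags` dict of A (shared by B, which writes the same literal)
def pvFlags : PySem.Dict Int String :=
  PySem.Dict.mk [(1, "can_attack"), (3, "can_transport"), (4, "can_deploy"),
                 (5, "can_hold"), (6, "can_espionage"), (9, "can_destroy")]

-- the body of A's `for m in available or []` loop
def pvStepA (res : PySem.Dict String Int) (m : List (String × Int)) : PySem.Dict String Int :=
  match (PySem.Dict.mk m).get? "missionType" with
  | some mt =>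
      match pvFlags.get? mt with
      | some name => res.insert name 1
      | none => res
  | none => res

def parse_mission_flags (available : Option (List (List (String × Int)))) : List (String × Int) :=
  -- result = {v: 0 for v in flags.values()}
  let result : PySem.Dict String Int :=
    pvFlags.values.foldl (fun d v => d.insert v 0) PySem.Dict.empty
  -- for m in available or []: …
  let result := (available.getD []).foldl pvStepA result
  result.items

-- ===== PORT B =====
def parse_mission_flags_alt (available : Option (List (List (String × Int)))) : List (String × Int) :=
  -- present = {m.get("missionType") for m in available or []}
  let present : PySem.Set (Option Int) :=
    PySem.Set.ofList ((available.getD []).map (fun m => (PySem.Dict.mk m).get? "missionType"))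
  -- {name: int(mt in present) for mt, name in flags.items()}
  pvFlags.items.map (fun p => (p.2, if PySem.Set.contains present (some p.1) then (1 : Int) else 0))

-- ===== PRECONDITION & SPEC =====
def Spec_parse_mission_flags (available : Option (List (List (String × Int)))) (out : List (String × Int)) : Prop := out = parse_mission_flags_alt available
instance (available : Option (List (List (String × Int)))) (out : List (String × Int)) : Decidable (Spec_parse_mission_flags available out) := by unfold Spec_parse_mission_flags; infer_instance

-- ===== CLAIM (what is proved, stated in full; the proofs are below) =====
def Claim_equal_parse_mission_flags : Prop := ∀ (available : Option (List (List (String × Int)))), Dom_parse_mission_flags available → Spec_parse_mission_flags available (parse_mission_flags available)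

-- ===== LEMMAS AND PROOFS =====

-- the value each mission contributes to the `present` set / to A's lookup
def pvMT (m : List (String × Int)) : Option Int := (PySem.Dict.mk m).get? "missionType"

-- invariant of A's loop: folding pvStepA over L from the 6-key literal dict sets a slot
-- to 1 exactly when some mission in L carries that missionType, otherwise keeps it
-- merging the head mission's write with the rest of the loop
theorem pvIte (p q : Prop) [Decidable p] [Decidable q] (b : Int) :
    (if q then (1 : Int) else if p then 1 else b) = if p ∨ q then 1 else b := by
  split_ifs <;> tauto

theorem pvFoldA (L : List (List (String × Int))) (b1 b2 b3 b4 b5 b6 : Int) :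
    L.foldl pvStepA (PySem.Dict.mk
      [("can_attack", b1), ("can_transport", b2), ("can_deploy", b3),
       ("can_hold", b4), ("can_espionage", b5), ("can_destroy", b6)]) =
    PySem.Dict.mk
      [("can_attack", if some 1 ∈ L.map pvMT then 1 else b1),
       ("can_transport", if some 3 ∈ L.map pvMT then 1 else b2),
       ("can_deploy", if some 4 ∈ L.map pvMT then 1 else b3),
       ("can_hold", if some 5 ∈ L.map pvMT then 1 else b4),
       ("can_espionage", if some 6 ∈ L.map pvMT then 1 else b5),
       ("can_destroy", if some 9 ∈ L.map pvMT then 1 else b6)] := by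
  induction L generalizing b1 b2 b3 b4 b5 b6 with
  | nil => simp
  | cons m L ih =>
    rw [List.foldl_cons]
    have hstep : pvStepA (PySem.Dict.mk
        [("can_attack", b1), ("can_transport", b2), ("can_deploy", b3),
         ("can_hold", b4), ("can_espionage", b5), ("can_destroy", b6)]) m =
      PySem.Dict.mk
        [("can_attack", if pvMT m = some 1 then 1 else b1),
         ("can_transport", if pvMT m = some 3 then 1 else b2),
         ("can_deploy", if pvMT m = some 4 then 1 else b3),
         ("can_hold", if pvMT m = some 5 then 1 else b4),
         ("can_espionage", if pvMT m = some 6 then 1 else b5),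
         ("can_destroy", if pvMT m = some 9 then 1 else b6)] := by
      unfold pvStepA
      rcases hm : (PySem.Dict.mk m).get? "missionType" with _ | v
      · simp [pvMT, hm]
      · by_cases h1 : v = 1
        · subst h1
          have hg : pvFlags.get? 1 = some "can_attack" := by decide
          simp [pvMT, hm, hg, PySem.Dict.insert]
        · by_cases h3 : v = 3
          · subst h3
            have hg : pvFlags.get? 3 = some "can_transport" := by decide
            simp [pvMT, hm, hg, PySem.Dict.insert]
          · by_cases h4 : v = 4
            · subst h4
              have hg : pvFlags.get? 4 = some "can_deploy" := by decide
              simp [pvMT, hm, hg, PySem.Dict.insert]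
            · by_cases h5 : v = 5
              · subst h5
                have hg : pvFlags.get? 5 = some "can_hold" := by decide
                simp [pvMT, hm, hg, PySem.Dict.insert]
              · by_cases h6 : v = 6
                · subst h6
                  have hg : pvFlags.get? 6 = some "can_espionage" := by decide
                  simp [pvMT, hm, hg, PySem.Dict.insert]
                · by_cases h9 : v = 9
                  · subst h9
                    have hg : pvFlags.get? 9 = some "can_destroy" := by decide
                    simp [pvMT, hm, hg, PySem.Dict.insert]
                  · have hn : pvFlags.get? v = none := by
                      have h : ¬(1 = v) ∧ ¬(3 = v) ∧ ¬(4 = v) ∧ ¬(5 = v) ∧ ¬(6 = v) ∧ ¬(9 = v) := by omega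
                      simp [pvFlags, PySem.Dict.get?,
                            h.1, h.2.1, h.2.2.1, h.2.2.2.1, h.2.2.2.2.1, h.2.2.2.2.2]
                    simp [pvMT, hm, hn, h1, h3, h4, h5, h6, h9]
    rw [hstep, ih]
    simp only [List.map_cons, List.mem_cons, pvIte]
    congr 1; simp [eq_comm]

theorem parse_mission_flags_eq (available : Option (List (List (String × Int)))) :
    parse_mission_flags available = parse_mission_flags_alt available := by
  have h0 : parse_mission_flags available =
      ((available.getD []).foldl pvStepA (PySem.Dict.mk
        [("can_attack", 0), ("can_transport", 0), ("can_deploy", 0),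
         ("can_hold", 0), ("can_espionage", 0), ("can_destroy", 0)])).items := rfl
  rw [h0, pvFoldA]
  simp [parse_mission_flags_alt, pvFlags, pvMT, PySem.Dict.items,
        PySem.Set.mem_ofList, List.mem_map]

-- ===== VERDICT (by name: the statement is the Claim_ definition above) =====
theorem parse_mission_flags_spec : Claim_equal_parse_mission_flags := by
  intro available _
  exact parse_mission_flags_eq available
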